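-- pv_equiv track=rewrite | github.com/123R3N321/PTC | legacy/cs1114and1134/1134.py | flip2375
-- ===== SOURCE A (Python) =====
-- def addBackwardAndClearBuffer(input, addend):
--     for i in range(len(addend) - 1, -1, -1):
--         input.append(addend[i])
--     addend.clear()
--
-- def flip2375(arr):
--     bot = 9
--     res = []
--     buffer = []
--     for each in arr:
--         if each == 'I':
--             buffer.append(bot)
--         elif each == 'D':
--             res.append(bot)
--             addBackwardAndClearBuffer(res, buffer) if len(buffer) > 0 else None
--         bot -= 1
--     res.append(bot)
--     addBackwardAndClearBuffer(res, buffer) if len(buffer) > 0 else None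
--     return ''.join(map(str, res))
-- ===== SOURCE B (Python) =====
-- def flip2375(arr):
--     bot = 9
--     res = []
--     seg = []
--     for each in arr:
--         if each == 'I':
--             seg.append(bot)
--         elif each == 'D':
--             seg.append(bot)
--             res.extend(sorted(seg))
--             seg = []
--         bot -= 1
--     seg.append(bot)
--     res.extend(sorted(seg))
--     return ''.join(map(str, res))
-- ===== Notes on version B (the rewrite author's own statement) =====
-- stated objective: alternative
-- what changed: Replaces A's reversed-index flush of a separate buffer at each 'D' with maintaining one current segment and emitting sorted(segment) at each terminator (equivalent because buffered values are strictly descending).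
import Mathlib
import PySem

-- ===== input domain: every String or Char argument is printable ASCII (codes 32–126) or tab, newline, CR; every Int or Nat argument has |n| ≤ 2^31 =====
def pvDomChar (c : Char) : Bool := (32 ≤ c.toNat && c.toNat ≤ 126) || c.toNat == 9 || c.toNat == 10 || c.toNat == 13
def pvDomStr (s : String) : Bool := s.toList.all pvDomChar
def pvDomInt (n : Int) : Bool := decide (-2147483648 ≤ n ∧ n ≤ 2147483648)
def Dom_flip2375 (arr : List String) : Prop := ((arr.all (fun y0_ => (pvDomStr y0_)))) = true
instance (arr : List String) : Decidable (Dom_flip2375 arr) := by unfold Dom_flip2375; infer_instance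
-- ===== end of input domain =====

-- B replaces A's reversed-index buffer flush with emitting sorted(segment) at each terminator; alternative strategy, same results.


-- ===== PORT A =====
-- for i in range(len(addend)-1, -1, -1): input.append(addend[i]); addend.clear()
-- (the index i is always in range, so addend[i] is pyGetD with an unreachable default; the caller receives the new `input`)
def addBackwardAndClearBuffer (input addend : List Int) : List Int :=
  (PySem.List.pyRange ((addend.length : Int) - 1) (-1) (-1)).foldl
    (fun acc i => acc ++ [PySem.List.pyGetD addend i 0]) input

def flip2375Step (st : Int × List Int × List Int) (each : String) : Int × List Int × List Int :=
  let bot := st.1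
  let res := st.2.1
  let buffer := st.2.2
  if each = "I" then (bot - 1, res, buffer ++ [bot])
  else if each = "D" then
    let res := res ++ [bot]
    if buffer.length > 0 then (bot - 1, addBackwardAndClearBuffer res buffer, [])
    else (bot - 1, res, buffer)
  else (bot - 1, res, buffer)

def flip2375Finish (st : Int × List Int × List Int) : List Int :=
  let res := st.2.1 ++ [st.1]
  if st.2.2.length > 0 then addBackwardAndClearBuffer res st.2.2 else res

def flip2375 (arr : List String) : String :=
  PySem.Str.join "" ((flip2375Finish (arr.foldl flip2375Step (9, [], []))).map PySem.Int.toStr)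

-- ===== PORT B =====
def flip2375AltStep (st : Int × List Int × List Int) (each : String) : Int × List Int × List Int :=
  let bot := st.1
  let res := st.2.1
  let seg := st.2.2
  if each = "I" then (bot - 1, res, seg ++ [bot])
  else if each = "D" then
    (bot - 1, res ++ PySem.List.sorted (seg ++ [bot]) (fun x => x) false, [])
  else (bot - 1, res, seg)

def flip2375AltFinish (st : Int × List Int × List Int) : List Int :=
  st.2.1 ++ PySem.List.sorted (st.2.2 ++ [st.1]) (fun x => x) false

def flip2375_alt (arr : List String) : String :=
  PySem.Str.join "" ((flip2375AltFinish (arr.foldl flip2375AltStep (9, [], []))).map PySem.Int.toStr)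

-- ===== PRECONDITION & SPEC =====
def Spec_flip2375 (arr : List String) (out : String) : Prop := out = flip2375_alt arr
instance (arr : List String) (out : String) : Decidable (Spec_flip2375 arr out) := by unfold Spec_flip2375; infer_instance

-- ===== CLAIM (what is proved, stated in full; the proofs are below) =====
def Claim_equal_flip2375 : Prop := ∀ (arr : List String), Dom_flip2375 arr → Spec_flip2375 arr (flip2375 arr)

-- ===== LEMMAS AND PROOFS =====

theorem foldl_append_map {α β : Type} (f : α → β) :
    ∀ (l : List α) (init : List β),
      l.foldl (fun acc i => acc ++ [f i]) init = init ++ l.map f := by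
  intro l
  induction l with
  | nil => intro init; simp
  | cons x xs ih => intro init; simp [List.foldl, ih]

theorem addBackward_eq (input addend : List Int) :
    addBackwardAndClearBuffer input addend = input ++ addend.reverse := by
  unfold addBackwardAndClearBuffer
  have h : PySem.List.pyRange ((addend.length : Int) - 1) (-1) (-1)
      = (PySem.List.pyRange 0 (addend.length : Int) 1).reverse := by
    rw [PySem.List.pyRange_neg_one_eq_reverse]
    norm_num
  rw [h, foldl_append_map, List.map_reverse]
  have h2 : (PySem.List.pyRange 0 ((addend.length : Int)) 1).map
      (fun i => PySem.List.pyGetD addend i 0) = addend := by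
    simpa using PySem.List.map_pyGetD_pyRange_zero addend 0
  rw [h2]

theorem sorted_flush (buffer : List Int) (bot : Int)
    (h : (bot :: buffer.reverse).Pairwise (· < ·)) :
    PySem.List.sorted (buffer ++ [bot]) (fun x => x) false = bot :: buffer.reverse := by
  apply PySem.List.sorted_eq_of_perm_of_pairwise_lt
  · exact (List.Perm.cons bot buffer.reverse_perm).trans
      (List.perm_append_comm (l₁ := [bot]) (l₂ := buffer))
  · exact h

theorem main_loop : ∀ (arr : List String) (bot : Int) (res buffer : List Int),
    (bot :: buffer.reverse).Pairwise (· < ·) →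
    flip2375Finish (arr.foldl flip2375Step (bot, res, buffer))
      = flip2375AltFinish (arr.foldl flip2375AltStep (bot, res, buffer)) := by
  intro arr
  induction arr with
  | nil =>
    intro bot res buffer h
    simp only [List.foldl_nil, flip2375Finish, flip2375AltFinish, sorted_flush buffer bot h]
    by_cases hb : buffer.length > 0
    · simp [hb, addBackward_eq]
    · have : buffer = [] := by
        cases buffer with
        | nil => rfl
        | cons x xs => simp at hb
      simp [this]
  | cons each rest ih =>
    intro bot res buffer h
    simp only [List.foldl_cons]
    by_cases hI : each = "I"
    · simp only [flip2375Step, flip2375AltStep, hI]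
      apply ih
      have h1 := (List.pairwise_cons.mp h).1
      have h2 := (List.pairwise_cons.mp h).2
      simp only [List.reverse_append, List.reverse_singleton, List.singleton_append]
      refine List.pairwise_cons.mpr ⟨?_, List.pairwise_cons.mpr ⟨fun x hx => h1 x hx, h2⟩⟩
      intro x hx
      rcases List.mem_cons.mp hx with rfl | hx
      · omega
      · have := h1 x hx; omega
    · by_cases hD : each = "D"
      · simp only [flip2375Step, flip2375AltStep, if_neg hI, if_pos hD]
        have hflush : res ++ PySem.List.sorted (buffer ++ [bot]) (fun x => x) false
            = (res ++ [bot]) ++ buffer.reverse := by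
          rw [sorted_flush buffer bot h]; simp
        by_cases hb : buffer.length > 0
        · simp only [hb, addBackward_eq]
          rw [← hflush]
          apply ih
          simp
        · have hnil : buffer = [] := by
            cases buffer with
            | nil => rfl
            | cons x xs => simp at hb
          subst hnil
          simp only [hb]
          have : res ++ PySem.List.sorted ([] ++ [bot]) (fun x => x) false = res ++ [bot] := by
            rw [hflush]; simp
          rw [this]
          apply ih
          simp
      · simp only [flip2375Step, flip2375AltStep, if_neg hI, if_neg hD]
        apply ih
        rcases List.pairwise_cons.mp h with ⟨h1, h2⟩
        exact List.pairwise_cons.mpr ⟨fun x hx => by have := h1 x hx; omega, h2⟩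

-- ===== VERDICT (by name: the statement is the Claim_ definition above) =====
theorem flip2375_spec : Claim_equal_flip2375 := by
  intro arr _
  unfold Spec_flip2375 flip2375 flip2375_alt
  rw [main_loop arr 9 [] [] (by simp)]
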